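-- pv_equiv track=rewrite | github.com/jiwon79/image-fourier-transformation | mst_algorithm.py | mst_dfs
-- ===== SOURCE A (Python) =====
-- def mst_dfs(mst, pointList):
--     graph, color, pred = {}, {}, {}
--     path = [0]
--
--     N = len(pointList)
--     for i in range(N):
--         graph[i] = []
--
--     for e in mst:
--         graph[e[0]].append(e[1])
--         graph[e[1]].append(e[0])
--
--     def DFSvisit(node):
--         color[node] = 1
--         for adj in graph[node]:
--             if color[adj] == 0:
--                 path.append(adj)
--                 pred[adj] = node
--                 DFSvisit(adj)
--                 path.append(pred[adj])
--         color[node] = 2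
--
--     for node in graph.keys():
--         color[node] = 0
--         pred[node] = -1
--     for node in graph.keys():
--         if(color[node] == 0):
--             DFSvisit(node)
--     return path
-- ===== SOURCE B (Python) =====
-- def mst_dfs(mst, pointList):
--     N = len(pointList)
--     graph = {i: [] for i in range(N)}
--     for a, b in mst:
--         graph[a].append(b)
--         graph[b].append(a)
--     color = {i: 0 for i in range(N)}
--     pred = {i: -1 for i in range(N)}
--     path = [0]
--     for start in range(N):
--         if color[start] != 0:
--             continue
--         color[start] = 1
--         stack = [(start, 0)]
--         while stack:
--             node, i = stack.pop()
--             adjs = graph[node]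
--             while i < len(adjs) and color[adjs[i]] != 0:
--                 i += 1
--             if i < len(adjs):
--                 adj = adjs[i]
--                 path.append(adj)
--                 pred[adj] = node
--                 color[adj] = 1
--                 stack.append((node, i + 1))
--                 stack.append((adj, 0))
--             else:
--                 color[node] = 2
--                 if stack:
--                     path.append(pred[node])
--     return path
-- ===== Notes on version B (the rewrite author's own statement) =====
-- stated objective: alternative
-- what changed: A's recursive DFSvisit (call-stack recursion mutating color/pred/path) is replaced by an iterative DFS driven by an explicit stack of (node, next-adjacency-index) frames that reproduces the same Euler-like append order without recursion.
import Mathlib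
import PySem

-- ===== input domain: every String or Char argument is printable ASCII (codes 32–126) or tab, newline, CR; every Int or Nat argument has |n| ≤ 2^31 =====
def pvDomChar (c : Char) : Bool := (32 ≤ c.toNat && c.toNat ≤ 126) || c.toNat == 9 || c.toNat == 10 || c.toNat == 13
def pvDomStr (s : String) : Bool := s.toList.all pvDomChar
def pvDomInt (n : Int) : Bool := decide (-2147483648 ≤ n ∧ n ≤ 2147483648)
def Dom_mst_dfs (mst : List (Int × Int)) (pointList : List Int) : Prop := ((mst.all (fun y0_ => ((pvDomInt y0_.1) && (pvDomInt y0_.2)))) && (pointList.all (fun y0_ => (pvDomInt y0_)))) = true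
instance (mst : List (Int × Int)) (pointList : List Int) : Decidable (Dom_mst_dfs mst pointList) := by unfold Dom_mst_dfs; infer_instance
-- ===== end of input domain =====

-- B replaces A's recursive DFSvisit by an iterative DFS over an explicit stack of
-- (node, next-adjacency-index) frames producing the identical Euler-like path (alternative
-- decomposition, same O(N+E) cost; both ports totalized with a fuel bound proved sufficient).

-- shared state record: the Python's three mutable dicts/list (color, pred, path)
structure PvSt where
  color : PySem.Dict Int Int
  pred : PySem.Dict Int Int
  path : List Int
deriving Repr, DecidableEq

-- ===== PORT A =====
-- A-side helpers: the recursive DFSvisit; fuel only totalizes the recursion (proved sufficient below)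
mutual
def dfsA (g : PySem.Dict Int (List Int)) (fuel : Nat) (node : Int) (st : PvSt) : Option PvSt :=
  match fuel with
  | 0 => none
  | f + 1 =>
    (dfsAList g f node (g.getD node []) ⟨st.color.insert node 1, st.pred, st.path⟩).map
      (fun s => ⟨s.color.insert node 2, s.pred, s.path⟩)
  termination_by (fuel, 0)

def dfsAList (g : PySem.Dict Int (List Int)) (fuel : Nat) (node : Int) (adjs : List Int) (st : PvSt) : Option PvSt :=
  match adjs with
  | [] => some st
  | adj :: rest =>
    if st.color.getD adj 0 = 0 then
      match dfsA g fuel adj ⟨st.color, st.pred.insert adj node, st.path ++ [adj]⟩ with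
      | none => none
      | some s2 => dfsAList g fuel node rest ⟨s2.color, s2.pred, s2.path ++ [s2.pred.getD adj (-1)]⟩
    else dfsAList g fuel node rest st
  termination_by (fuel, adjs.length + 1)
end

def mst_dfs (mst : List (Int × Int)) (pointList : List Int) : List Int :=
  let N : Int := pointList.length
  let g0 : PySem.Dict Int (List Int) :=
    (PySem.List.pyRange 0 N 1).foldl (fun g i => g.insert i []) PySem.Dict.empty
  let g := mst.foldl
    (fun g e => (g.modify e.1 [] (fun l => l ++ [e.2])).modify e.2 [] (fun l => l ++ [e.1])) g0
  let st1 := g.keys.foldl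
    (fun (st : PvSt) node => ⟨st.color.insert node 0, st.pred.insert node (-1), st.path⟩)
    ⟨PySem.Dict.empty, PySem.Dict.empty, [0]⟩
  let fuel := ((g.keys ++ g.values.flatten).dedup).length + 1
  let stF := g.keys.foldl
    (fun st node => if st.color.getD node 0 = 0 then (dfsA g fuel node st).getD st else st) st1
  stF.path

-- ===== PORT B =====
-- B-side helpers: the inner `while i < len(adjs) and color[adjs[i]] != 0: i += 1`
def pvAdv (c : PySem.Dict Int Int) (adjs : List Int) (i : Nat) : Nat :=
  if h : i < adjs.length then
    if c.getD adjs[i] 0 ≠ 0 then pvAdv c adjs (i + 1) else i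
  else i
  termination_by adjs.length - i

-- the frame-exhausted branch: mark color 2 and append pred[node] when the stack is nonempty
def pvFinish (node : Int) (S : List (Int × Nat)) (st : PvSt) : PvSt :=
  ⟨st.color.insert node 2, st.pred,
   if S.isEmpty then st.path else st.path ++ [st.pred.getD node (-1)]⟩

-- the `while stack:` loop; fuel only totalizes the loop (proved sufficient below)
def runB (g : PySem.Dict Int (List Int)) : Nat → List (Int × Nat) → PvSt → Option PvSt
  | _, [], st => some st
  | 0, _ :: _, _ => none
  | fuel + 1, (node, i) :: S, st =>
    let adjs := g.getD node []
    let j := pvAdv st.color adjs i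
    if h : j < adjs.length then
      runB g fuel ((adjs[j], 0) :: (node, j + 1) :: S)
        ⟨st.color.insert adjs[j] 1, st.pred.insert adjs[j] node, st.path ++ [adjs[j]]⟩
    else
      runB g fuel S (pvFinish node S st)

def mst_dfs_alt (mst : List (Int × Int)) (pointList : List Int) : List Int :=
  let N : Int := pointList.length
  let g0 : PySem.Dict Int (List Int) :=
    (PySem.List.pyRange 0 N 1).foldl (fun g i => g.insert i []) PySem.Dict.empty
  let g := mst.foldl
    (fun g e => (g.modify e.1 [] (fun l => l ++ [e.2])).modify e.2 [] (fun l => l ++ [e.1])) g0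
  let color0 := (PySem.List.pyRange 0 N 1).foldl (fun (d : PySem.Dict Int Int) i => d.insert i 0) PySem.Dict.empty
  let pred0 := (PySem.List.pyRange 0 N 1).foldl (fun (d : PySem.Dict Int Int) i => d.insert i (-1)) PySem.Dict.empty
  let fuel := 2 * ((g.keys ++ g.values.flatten).dedup).length + 2
  let stF := (PySem.List.pyRange 0 N 1).foldl
    (fun (st : PvSt) start =>
      if st.color.getD start 0 ≠ 0 then st
      else (runB g fuel [(start, 0)] ⟨st.color.insert start 1, st.pred, st.path⟩).getD st)
    ⟨color0, pred0, [0]⟩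
  stF.path

-- ===== PRECONDITION & SPEC =====
-- Pre_ excludes exactly the inputs where A raises KeyError: an edge endpoint that is not
-- an index 0..len(pointList)-1 (B raises there too).
def Pre_mst_dfs (mst : List (Int × Int)) (pointList : List Int) : Prop :=
  ∀ e ∈ mst, (0 ≤ e.1 ∧ e.1 < (pointList.length : Int)) ∧ (0 ≤ e.2 ∧ e.2 < (pointList.length : Int))
instance (mst : List (Int × Int)) (pointList : List Int) : Decidable (Pre_mst_dfs mst pointList) := by
  unfold Pre_mst_dfs; infer_instance

def pvWitness_mst_dfs : (List (Int × Int)) × List Int := ([(0, 1), (1, 2)], [5, 9, 7])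

def Spec_mst_dfs (mst : List (Int × Int)) (pointList : List Int) (out : List Int) : Prop := out = mst_dfs_alt mst pointList
instance (mst : List (Int × Int)) (pointList : List Int) (out : List Int) : Decidable (Spec_mst_dfs mst pointList out) := by unfold Spec_mst_dfs; infer_instance

-- ===== CLAIM (what is proved, stated in full; the proofs are below) =====
def Claim_equal_mst_dfs : Prop := ∀ (mst : List (Int × Int)) (pointList : List Int), Dom_mst_dfs mst pointList → Pre_mst_dfs mst pointList → Spec_mst_dfs mst pointList (mst_dfs mst pointList)

-- ===== LEMMAS AND PROOFS =====

-- the finite universe of nodes a traversal can ever touch, and the count of still-white ones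
def pvU (g : PySem.Dict Int (List Int)) : List Int := (g.keys ++ g.values.flatten).dedup
def pvFresh (g : PySem.Dict Int (List Int)) (c : PySem.Dict Int Int) : Nat :=
  ((pvU g).filter (fun k => c.getD k 0 == 0)).length

theorem pvU_nodup (g : PySem.Dict Int (List Int)) : (pvU g).Nodup := List.nodup_dedup _

theorem pv_mem_adj_mem_U (g : PySem.Dict Int (List Int)) (node a : Int)
    (h : a ∈ g.getD node []) : a ∈ pvU g := by
  rw [PySem.Dict.getD_eq_get?_getD] at h
  cases hg : g.get? node with
  | none => rw [hg] at h; simp at h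
  | some v =>
    rw [hg] at h
    simp only [Option.getD_some] at h
    have hit : (node, v) ∈ g.items := PySem.Dict.mem_items_of_get?_eq_some _ hg
    have hv : v ∈ g.values := by
      simp only [PySem.Dict.values]
      exact List.mem_map.mpr ⟨(node, v), hit, rfl⟩
    exact List.mem_dedup.mpr (List.mem_append_right _ (List.mem_flatten.mpr ⟨v, hv, h⟩))

theorem pvFresh_le (g : PySem.Dict Int (List Int)) (c : PySem.Dict Int Int) :
    pvFresh g c ≤ (pvU g).length := List.length_filter_le _ _

-- fresh count after whitening-irrelevant pointwise implication
theorem pv_filter_mono {α : Type} (l : List α) (p q : α → Bool)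
    (h : ∀ x ∈ l, p x = true → q x = true) : (l.filter p).length ≤ (l.filter q).length := by
  induction l with
  | nil => simp
  | cons x t ih =>
    have ht := ih (fun y hy => h y (List.mem_cons_of_mem _ hy))
    simp only [List.filter_cons]
    by_cases hp : p x = true
    · rw [hp, h x List.mem_cons_self hp]; simpa using ht
    · simp only [if_neg hp]
      cases hq : q x <;> simp <;> omega

theorem pv_filter_dec {α : Type} [DecidableEq α] (l : List α) (hnd : l.Nodup) (a : α)
    (ha : a ∈ l) (p q : α → Bool) (hpa : p a = true) (hqa : q a = false)
    (hother : ∀ x ∈ l, x ≠ a → q x = p x) :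
    (l.filter q).length + 1 = (l.filter p).length := by
  induction l with
  | nil => simp at ha
  | cons x t ih =>
    have hnd' := (List.nodup_cons.mp hnd).2
    have hxa := (List.nodup_cons.mp hnd).1
    simp only [List.filter_cons]
    by_cases hx : x = a
    · subst hx
      rw [hpa, hqa]
      have : t.filter q = t.filter p := by
        apply List.filter_congr
        intro y hy
        exact hother y (List.mem_cons_of_mem _ hy) (fun hya => hxa (hya ▸ hy))
      simp [this]
    · have hq : q x = p x := hother x List.mem_cons_self hx
      have ha' : a ∈ t := by
        rcases List.mem_cons.mp ha with h1 | h1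
        · exact absurd h1.symm hx
        · exact h1
      have iht := ih hnd' ha' (fun y hy hya => hother y (List.mem_cons_of_mem _ hy) hya)
      rw [hq]
      cases hp : p x <;> simp [iht]

-- coloring a white node decrements the fresh count
theorem pvFresh_insert_one (g : PySem.Dict Int (List Int)) (c : PySem.Dict Int Int) (node : Int)
    (hmem : node ∈ pvU g) (hc : c.getD node 0 = 0) :
    pvFresh g (c.insert node 1) + 1 = pvFresh g c := by
  refine pv_filter_dec _ (pvU_nodup g) node hmem _ _ (by simp [hc]) ?_ ?_
  · simp
  · intro x _ hx; simp [PySem.Dict.getD_insert, hx]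

theorem pvFresh_insert_nonzero (g : PySem.Dict Int (List Int)) (c : PySem.Dict Int Int) (node v : Int)
    (hc : c.getD node 0 ≠ 0) (hv : v ≠ 0) :
    pvFresh g (c.insert node v) = pvFresh g c := by
  unfold pvFresh
  congr 1
  apply List.filter_congr
  intro x _
  by_cases hx : x = node
  · subst hx; simp [hc, hv]
  · simp [PySem.Dict.getD_insert, hx]

-- colors never return to 0
theorem pvMono (g : PySem.Dict Int (List Int)) (fuel : Nat) :
    (∀ node st st', dfsA g fuel node st = some st' →
      ∀ k, st.color.getD k 0 ≠ 0 → st'.color.getD k 0 ≠ 0) ∧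
    (∀ node adjs st st', dfsAList g fuel node adjs st = some st' →
      ∀ k, st.color.getD k 0 ≠ 0 → st'.color.getD k 0 ≠ 0) := by
  induction fuel using Nat.strong_induction_on with
  | _ fuel IH =>
    have hA : ∀ node st st', dfsA g fuel node st = some st' →
        ∀ k, st.color.getD k 0 ≠ 0 → st'.color.getD k 0 ≠ 0 := by
      intro node st st' h k hk
      cases fuel with
      | zero => simp [dfsA] at h
      | succ f =>
        rw [dfsA] at h
        rcases Option.map_eq_some_iff.mp h with ⟨s, hs, hst'⟩
        subst hst'
        simp only [PySem.Dict.getD_insert]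
        by_cases hkn : k = node
        · simp [hkn]
        · rw [if_neg hkn]
          refine (IH f (by omega)).2 node _ _ s hs k ?_
          by_cases hkn2 : k = node
          · exact absurd hkn2 hkn
          · simpa [PySem.Dict.getD_insert, hkn2] using hk
    refine ⟨hA, ?_⟩
    intro node adjs st st' h k hk
    induction adjs generalizing st with
    | nil => rw [dfsAList] at h; cases h; exact hk
    | cons adj rest ihl =>
      rw [dfsAList] at h
      by_cases hc : st.color.getD adj 0 = 0
      · rw [if_pos hc] at h
        cases hm : dfsA g fuel adj ⟨st.color, st.pred.insert adj node, st.path ++ [adj]⟩ with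
        | none => rw [hm] at h; cases h
        | some s2 =>
          rw [hm] at h
          exact ihl _ h (hA adj _ _ hm k hk)
      · rw [if_neg hc] at h
        exact ihl _ h hk

theorem pvFresh_mono_A (g : PySem.Dict Int (List Int)) (fuel : Nat) (node : Int)
    (st st' : PvSt) (h : dfsA g fuel node st = some st') :
    pvFresh g st'.color ≤ pvFresh g st.color := by
  apply pv_filter_mono
  intro x _ hx
  by_contra hq
  exact absurd hx (by simpa using (pvMono g fuel).1 node st st' h x (by simpa using hq))

-- fuel sufficiency for A's recursion
theorem pvSuff (g : PySem.Dict Int (List Int)) (fuel : Nat) :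
    (∀ node st, node ∈ pvU g → st.color.getD node 0 = 0 → pvFresh g st.color ≤ fuel →
      ∃ s, dfsA g fuel node st = some s) ∧
    (∀ node adjs st, (∀ a ∈ adjs, a ∈ pvU g) → pvFresh g st.color ≤ fuel →
      ∃ s, dfsAList g fuel node adjs st = some s) := by
  induction fuel using Nat.strong_induction_on with
  | _ fuel IH =>
    have hA : ∀ node st, node ∈ pvU g → st.color.getD node 0 = 0 → pvFresh g st.color ≤ fuel →
        ∃ s, dfsA g fuel node st = some s := by
      intro node st hmem hc hf
      have hpos : 1 ≤ pvFresh g st.color := by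
        have : node ∈ (pvU g).filter (fun k => st.color.getD k 0 == 0) :=
          List.mem_filter.mpr ⟨hmem, by simp [hc]⟩
        have := List.length_pos_of_mem this
        exact this
      cases fuel with
      | zero => omega
      | succ f =>
        have hdec := pvFresh_insert_one g st.color node hmem hc
        obtain ⟨s, hs⟩ := (IH f (by omega)).2 node (g.getD node [])
          ⟨st.color.insert node 1, st.pred, st.path⟩
          (fun a ha => pv_mem_adj_mem_U g node a ha)
          (by simp only []; omega)
        exact ⟨⟨s.color.insert node 2, s.pred, s.path⟩, by rw [dfsA, hs]; rfl⟩
    refine ⟨hA, ?_⟩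
    intro node adjs st hadj hf
    induction adjs generalizing st with
    | nil => exact ⟨st, by rw [dfsAList]⟩
    | cons adj rest ihl =>
      by_cases hc : st.color.getD adj 0 = 0
      · obtain ⟨s2, hs2⟩ := hA adj ⟨st.color, st.pred.insert adj node, st.path ++ [adj]⟩
          (hadj adj List.mem_cons_self) hc hf
        have hmono := pvFresh_mono_A g fuel adj _ _ hs2
        obtain ⟨s3, hs3⟩ := ihl ⟨s2.color, s2.pred, s2.path ++ [s2.pred.getD adj (-1)]⟩
          (fun a ha => hadj a (List.mem_cons_of_mem _ ha)) (by simp only [] at hmono ⊢; omega)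
        exact ⟨s3, by rw [dfsAList, if_pos hc, hs2]; exact hs3⟩
      · obtain ⟨s3, hs3⟩ := ihl st (fun a ha => hadj a (List.mem_cons_of_mem _ ha)) hf
        exact ⟨s3, by rw [dfsAList, if_neg hc, hs3]⟩

-- pvAdv skips exactly the non-white prefix
theorem pvAdv_ge (c : PySem.Dict Int Int) (adjs : List Int) (i : Nat) : i ≤ pvAdv c adjs i := by
  fun_induction pvAdv with
  | case1 i h hc ih => omega
  | case2 i h hc => omega
  | case3 i h => omega

theorem pvAdv_hit (c : PySem.Dict Int Int) (adjs : List Int) (i : Nat)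
    (h : pvAdv c adjs i < adjs.length) : c.getD adjs[pvAdv c adjs i] 0 = 0 := by
  fun_induction pvAdv with
  | case1 i hlt hc ih => exact ih h
  | case2 i hlt hc => simpa using hc
  | case3 i hlt => omega

theorem pvSkip (g : PySem.Dict Int (List Int)) (fuel : Nat) (node : Int) (adjs : List Int)
    (i : Nat) (st : PvSt) :
    dfsAList g fuel node (adjs.drop i) st = dfsAList g fuel node (adjs.drop (pvAdv st.color adjs i)) st := by
  fun_induction pvAdv st.color adjs i with
  | case1 i hlt hc ih =>
    rw [List.drop_eq_getElem_cons hlt, dfsAList, if_neg hc]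
    exact ih
  | case2 i hlt hc => rfl
  | case3 i hlt => rfl

-- THE SIMULATION: B's machine, run from a frame (node, i), performs A's remaining loop body
-- for node and then continues with the rest of the stack, in exactly c steps.
theorem pvSim (g : PySem.Dict Int (List Int)) (fuel : Nat) (node : Int) (i : Nat)
    (S : List (Int × Nat)) (st st' : PvSt)
    (h : dfsAList g fuel node ((g.getD node []).drop i) st = some st') :
    ∃ c, c + 2 * pvFresh g st'.color ≤ 2 * pvFresh g st.color + 1 ∧
      ∀ fB, runB g (fB + c) ((node, i) :: S) st = runB g fB S (pvFinish node S st') := by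
  induction fuel using Nat.strong_induction_on generalizing node i S st st' with
  | _ fuel IHf =>
  have main : ∀ n i S st st', (g.getD node []).length - i ≤ n →
      dfsAList g fuel node ((g.getD node []).drop i) st = some st' →
      ∃ c, c + 2 * pvFresh g st'.color ≤ 2 * pvFresh g st.color + 1 ∧
        ∀ fB, runB g (fB + c) ((node, i) :: S) st = runB g fB S (pvFinish node S st') := by
    clear h
    intro n
    induction n using Nat.strong_induction_on with
    | _ n ihn =>
      intro i S st st' hle h
      rw [pvSkip g fuel node (g.getD node []) i st] at h
      have hge := pvAdv_ge st.color (g.getD node []) i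
      by_cases hlt : pvAdv st.color (g.getD node []) i < (g.getD node []).length
      · -- a white neighbor adjs[j] is found: push its frame
        have hhit := pvAdv_hit st.color (g.getD node []) i hlt
        rw [List.drop_eq_getElem_cons hlt, dfsAList, if_pos hhit] at h
        cases hm : dfsA g fuel (g.getD node [])[pvAdv st.color (g.getD node []) i]
            ⟨st.color, st.pred.insert (g.getD node [])[pvAdv st.color (g.getD node []) i] node,
             st.path ++ [(g.getD node [])[pvAdv st.color (g.getD node []) i]]⟩ with
        | none => rw [hm] at h; cases h
        | some s2 =>
          rw [hm] at h
          cases fuel with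
          | zero => rw [dfsA] at hm; cases hm
          | succ f =>
            rw [dfsA] at hm
            rcases Option.map_eq_some_iff.mp hm with ⟨s2', hs2', hseq⟩
            rw [← hseq] at h
            have h' : dfsAList g (f + 1) node ((g.getD node []).drop (pvAdv st.color (g.getD node []) i + 1))
                (pvFinish (g.getD node [])[pvAdv st.color (g.getD node []) i]
                  ((node, pvAdv st.color (g.getD node []) i + 1) :: S) s2') = some st' := by
              simpa [pvFinish] using h
            obtain ⟨c1, hc1b, hc1⟩ := IHf f (by omega)
              (g.getD node [])[pvAdv st.color (g.getD node []) i] 0 ((node, pvAdv st.color (g.getD node []) i + 1) :: S)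
              ⟨st.color.insert (g.getD node [])[pvAdv st.color (g.getD node []) i] 1,
               st.pred.insert (g.getD node [])[pvAdv st.color (g.getD node []) i] node,
               st.path ++ [(g.getD node [])[pvAdv st.color (g.getD node []) i]]⟩ s2'
              (by rw [List.drop_zero]; exact hs2')
            obtain ⟨c2, hc2b, hc2⟩ := ihn ((g.getD node []).length - (pvAdv st.color (g.getD node []) i + 1))
              (by omega) (pvAdv st.color (g.getD node []) i + 1) S _ st' (by omega) h'
            have hmemU : (g.getD node [])[pvAdv st.color (g.getD node []) i] ∈ pvU g :=
              pv_mem_adj_mem_U g node _ (List.getElem_mem hlt)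
            have hfr1 := pvFresh_insert_one g st.color _ hmemU hhit
            have hfr3 : pvFresh g (pvFinish (g.getD node [])[pvAdv st.color (g.getD node []) i]
                ((node, pvAdv st.color (g.getD node []) i + 1) :: S) s2').color = pvFresh g s2'.color := by
              apply pvFresh_insert_nonzero
              · exact (pvMono g f).2 _ _ _ _ hs2' _ (by simp)
              · omega
            refine ⟨1 + c1 + c2, ?_, ?_⟩
            · simp only [] at hc1b hc2b hfr1 hfr3 ⊢
              omega
            · intro fB
              have harith : fB + (1 + c1 + c2) = (fB + c2 + c1) + 1 := by omega
              rw [harith]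
              show runB g ((fB + c2 + c1) + 1) ((node, i) :: S) st = _
              rw [runB]
              rw [dif_pos hlt]
              rw [hc1 (fB + c2)]
              rw [hc2 fB]
      · -- adjacency exhausted: st' = st, one pop step
        have hdrop : (g.getD node []).drop (pvAdv st.color (g.getD node []) i) = [] :=
          List.drop_eq_nil_of_le (by omega)
        rw [hdrop, dfsAList] at h
        cases h
        refine ⟨1, by omega, ?_⟩
        intro fB
        show runB g (fB + 1) ((node, i) :: S) st = _
        rw [runB]
        rw [dif_neg hlt]
  exact main (g.getD node []).length i S st st' (by omega) h

-- the two per-start bodies agree on every state, for any node in the universe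
theorem pvStep_eq (g : PySem.Dict Int (List Int)) (node : Int) (st : PvSt) (hmem : node ∈ pvU g) :
    (if st.color.getD node 0 = 0 then (dfsA g ((pvU g).length + 1) node st).getD st else st) =
    (if st.color.getD node 0 ≠ 0 then st
     else (runB g (2 * (pvU g).length + 2) [(node, 0)] ⟨st.color.insert node 1, st.pred, st.path⟩).getD st) := by
  by_cases hc : st.color.getD node 0 = 0
  · rw [if_pos hc, if_neg (by simp [hc])]
    obtain ⟨stA, hA⟩ := (pvSuff g ((pvU g).length + 1)).1 node st hmem hc
      (by have := pvFresh_le g st.color; omega)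
    rw [hA]
    rw [dfsA] at hA
    rcases Option.map_eq_some_iff.mp hA with ⟨st', hs', heq⟩
    obtain ⟨c, hcb, hsim⟩ := pvSim g ((pvU g).length) node 0 [] _ st' (by rw [List.drop_zero]; exact hs')
    have hcle : c ≤ 2 * (pvU g).length + 2 := by
      have hcb' : c + 2 * pvFresh g st'.color ≤ 2 * pvFresh g (st.color.insert node 1) + 1 := hcb
      have h1 := pvFresh_le g (st.color.insert node 1)
      omega
    have hrun := hsim (2 * (pvU g).length + 2 - c)
    rw [Nat.sub_add_cancel hcle] at hrun
    rw [hrun, runB]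
    have : pvFinish node [] st' = stA := by
      rw [← heq]
      simp [pvFinish]
    rw [this]
  · rw [if_neg hc, if_pos hc]

-- init loop of A splits into B's two comprehensions
theorem pvInit_split (l : List Int) (st : PvSt) :
    l.foldl (fun (st : PvSt) node => ⟨st.color.insert node 0, st.pred.insert node (-1), st.path⟩) st =
    ⟨l.foldl (fun d k => d.insert k 0) st.color, l.foldl (fun d k => d.insert k (-1)) st.pred, st.path⟩ := by
  induction l generalizing st with
  | nil => rfl
  | cons x t ih => simp [List.foldl_cons, ih]

-- under Pre_, the built graph's keys are exactly range(N)
theorem pvKeys (mst : List (Int × Int)) (N : Int)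
    (hpre : ∀ e ∈ mst, (0 ≤ e.1 ∧ e.1 < N) ∧ (0 ≤ e.2 ∧ e.2 < N)) :
    (mst.foldl (fun g e => (g.modify e.1 [] (fun l => l ++ [e.2])).modify e.2 [] (fun l => l ++ [e.1]))
      ((PySem.List.pyRange 0 N 1).foldl (fun (g : PySem.Dict Int (List Int)) i => g.insert i []) PySem.Dict.empty)).keys
    = PySem.List.pyRange 0 N 1 := by
  have h0 : ((PySem.List.pyRange 0 N 1).foldl
      (fun (g : PySem.Dict Int (List Int)) i => g.insert i []) PySem.Dict.empty).keys
      = PySem.List.pyRange 0 N 1 := by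
    rw [PySem.Dict.keys_foldl_insert (f := fun _ _ => ([] : List Int))]
    rw [PySem.Dict.keys_empty]
    show PySem.Set.ofList _ = _
    exact PySem.Set.ofList_eq_self_of_nodup _ (PySem.List.nodup_pyRange_one 0 N)
  revert hpre
  generalize ((PySem.List.pyRange 0 N 1).foldl
      (fun (g : PySem.Dict Int (List Int)) i => g.insert i []) PySem.Dict.empty) = g at h0 ⊢
  induction mst generalizing g with
  | nil => intro _; exact h0
  | cons e rest ih =>
    intro hpre
    simp only [List.foldl_cons]
    apply ih
    · have hmem1 : (g.modify e.1 [] (fun l => l ++ [e.2])).keys = g.keys := by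
        rw [PySem.Dict.keys_modify]
        apply PySem.Dict.keys_insert_of_contains
        rw [PySem.Dict.contains_eq_decide_mem_keys, h0]
        simp [PySem.List.mem_pyRange_one]
        exact (hpre e List.mem_cons_self).1
      have hmem2 : ((g.modify e.1 [] (fun l => l ++ [e.2])).modify e.2 [] (fun l => l ++ [e.1])).keys
          = (g.modify e.1 [] (fun l => l ++ [e.2])).keys := by
        rw [PySem.Dict.keys_modify]
        apply PySem.Dict.keys_insert_of_contains
        rw [PySem.Dict.contains_eq_decide_mem_keys, hmem1, h0]
        simp [PySem.List.mem_pyRange_one]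
        exact (hpre e List.mem_cons_self).2
      rw [hmem2, hmem1, h0]
    · exact fun e' he' => hpre e' (List.mem_cons_of_mem _ he')

-- ===== VERDICT (by name: the statement is the Claim_ definition above) =====
theorem mst_dfs_spec : Claim_equal_mst_dfs := by
  intro mst pointList hdom hpre
  unfold Spec_mst_dfs
  simp only [mst_dfs, mst_dfs_alt]
  have hkeys := pvKeys mst (pointList.length : Int) hpre
  revert hkeys
  generalize hg : mst.foldl
    (fun g e => (g.modify e.1 [] (fun l => l ++ [e.2])).modify e.2 [] (fun l => l ++ [e.1]))
    ((PySem.List.pyRange 0 (pointList.length : Int) 1).foldl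
      (fun (g : PySem.Dict Int (List Int)) i => g.insert i []) PySem.Dict.empty) = g
  intro hkeys
  rw [← hkeys, pvInit_split]
  apply congrArg PvSt.path
  apply PySem.List.foldl_congr_mem
  intro acc x hx
  exact pvStep_eq g x acc (List.mem_dedup.mpr (List.mem_append_left _ hx))
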